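-- pv_equiv track=rewrite | github.com/mitrandir-pl/AOIS | lab5/laba_5.py | gluing
-- ===== SOURCE A (Python) =====
-- def gluing(SNF, amount):
--     nf = []
--     for i in range(len(SNF)):
--         summand1 = SNF[i]
--         for j in range(i+1, len(SNF)):
--             summand2 = SNF[j]
--             summand1_check = [i[-1] for i in summand1]
--             summand2_check = [i[-1] for i in summand2]
--             if summand1_check == summand2_check:
--                 implicant = []
--                 for k in summand2:
--                     if k in summand1:
--                         implicant.append(k)
--                 if len(implicant) == amount:
--                     nf.append(implicant)
--     return nf
-- ===== SOURCE B (Python) =====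
-- def gluing(SNF, amount):
--     buckets = {}
--     for idx in range(len(SNF)):
--         sig = tuple(lit[-1] for lit in SNF[idx])
--         buckets.setdefault(sig, []).append(idx)
--     nf = []
--     for i in range(len(SNF)):
--         summand1 = SNF[i]
--         sig = tuple(lit[-1] for lit in summand1)
--         for j in buckets[sig]:
--             if j > i:
--                 implicant = [k for k in SNF[j] if k in summand1]
--                 if len(implicant) == amount:
--                     nf.append(implicant)
--     return nf
-- ===== Notes on version B (the rewrite author's own statement) =====
-- stated objective: alternative
-- what changed: Replaces the quadratic all-pairs signature comparison with a signature-indexed bucket dictionary built in one pass; the second pass visits only same-signature index pairs (j>i within the bucket) and builds each implicant with a filter comprehension, preserving the exact output order.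
-- outside the precondition, e.g. on gluing([[[]]], 0): A returns [], B raises IndexError
import Mathlib
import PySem

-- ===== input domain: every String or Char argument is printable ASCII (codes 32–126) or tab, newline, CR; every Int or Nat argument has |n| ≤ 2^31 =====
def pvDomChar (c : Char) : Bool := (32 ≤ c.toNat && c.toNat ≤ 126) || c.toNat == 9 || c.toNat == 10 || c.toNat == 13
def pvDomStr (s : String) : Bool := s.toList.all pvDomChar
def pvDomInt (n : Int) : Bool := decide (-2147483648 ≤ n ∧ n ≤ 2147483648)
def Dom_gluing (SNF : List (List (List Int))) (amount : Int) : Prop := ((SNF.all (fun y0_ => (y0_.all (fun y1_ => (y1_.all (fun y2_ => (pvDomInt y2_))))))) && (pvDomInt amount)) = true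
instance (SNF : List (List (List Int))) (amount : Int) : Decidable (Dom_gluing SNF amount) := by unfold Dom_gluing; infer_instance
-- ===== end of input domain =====

-- B replaces the all-pairs signature comparison with a signature->indices bucket dictionary
-- built in one pass, then glues only same-signature index pairs (alternative decomposition).


-- ===== PORT A =====
-- [i[-1] for i in summand] (each literal is nonempty under Pre_, so pyGet? returns some; getD 0 is never the default there)
def sigA (s : List (List Int)) : List Int :=
  s.map (fun lit => (PySem.List.pyGet? lit (-1)).getD 0)

def gluing (SNF : List (List (List Int))) (amount : Int) : List (List (List Int)) :=
  (List.range SNF.length).foldl (fun nf i =>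
    let summand1 := SNF.getD i []
    (List.range' (i+1) (SNF.length - (i+1))).foldl (fun nf j =>
      let summand2 := SNF.getD j []
      if sigA summand1 = sigA summand2 then
        let implicant := summand2.foldl
          (fun acc k => if k ∈ summand1 then acc ++ [k] else acc) ([] : List (List Int))
        if (implicant.length : Int) = amount then nf ++ [implicant] else nf
      else nf) nf) []

-- ===== PORT B =====
-- tuple(lit[-1] for lit in summand)
def sigB (s : List (List Int)) : List Int :=
  s.map (fun lit => (PySem.List.pyGet? lit (-1)).getD 0)

-- buckets.setdefault(sig, []).append(idx)
def buildBuckets (SNF : List (List (List Int))) : PySem.Dict (List Int) (List Nat) :=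
  (List.range SNF.length).foldl (fun d idx =>
    let sig := sigB (SNF.getD idx [])
    PySem.Dict.insert d sig (PySem.Dict.getD d sig [] ++ [idx])) PySem.Dict.empty

def gluing_alt (SNF : List (List (List Int))) (amount : Int) : List (List (List Int)) :=
  let buckets := buildBuckets SNF
  (List.range SNF.length).foldl (fun nf i =>
    let summand1 := SNF.getD i []
    (PySem.Dict.getD buckets (sigB summand1) []).foldl (fun nf j =>
      if i < j then
        let implicant := (SNF.getD j []).filter (fun k => decide (k ∈ summand1))
        if (implicant.length : Int) = amount then nf ++ [implicant] else nf
      else nf) nf) []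

-- ===== PRECONDITION & SPEC =====
-- Pre_ excludes inputs containing an empty literal list: there signature computation lit[-1]
-- raises IndexError in A whenever len(SNF) ≥ 2 (and in B always); with a single summand A
-- happens to return [] without touching the literal, which B's eager indexing pass cannot match.
def Pre_gluing (SNF : List (List (List Int))) (amount : Int) : Prop :=
  ∀ s ∈ SNF, ∀ lit ∈ s, lit ≠ []
instance (SNF : List (List (List Int))) (amount : Int) : Decidable (Pre_gluing SNF amount) := by unfold Pre_gluing; infer_instance

def pvWitness_gluing : List (List (List Int)) × Int := ([[[0], [1, 2]], [[0], [2]]], 1)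

def Spec_gluing (SNF : List (List (List Int))) (amount : Int) (out : List (List (List Int))) : Prop := out = gluing_alt SNF amount
instance (SNF : List (List (List Int))) (amount : Int) (out : List (List (List Int))) : Decidable (Spec_gluing SNF amount out) := by unfold Spec_gluing; infer_instance

-- ===== CLAIM (what is proved, stated in full; the proofs are below) =====
def Claim_equal_gluing : Prop := ∀ (SNF : List (List (List Int))) (amount : Int), Dom_gluing SNF amount → Pre_gluing SNF amount → Spec_gluing SNF amount (gluing SNF amount)

-- ===== LEMMAS AND PROOFS =====

theorem bucket_foldl (SNF : List (List (List Int))) (l : List Nat)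
    (d : PySem.Dict (List Int) (List Nat)) (s : List Int) :
    PySem.Dict.getD
      (l.foldl (fun d idx =>
        let sig := sigB (SNF.getD idx [])
        PySem.Dict.insert d sig (PySem.Dict.getD d sig [] ++ [idx])) d) s [] =
    PySem.Dict.getD d s [] ++ l.filter (fun j => sigB (SNF.getD j []) = s) := by
  induction l generalizing d with
  | nil => simp
  | cons idx rest ih =>
    simp only [List.foldl_cons, List.filter_cons, ih]
    rw [PySem.Dict.getD_insert]
    by_cases h : sigB (SNF.getD idx []) = s
    · subst h; simp
    · simp only [List.getD] at h ⊢
      simp [h, Ne.symm h]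

theorem foldl_of_fixed {α β : Type} (f : β → α → β) (l : List α) (b : β)
    (h : ∀ x ∈ l, ∀ acc, f acc x = acc) : l.foldl f b = b := by
  induction l generalizing b with
  | nil => rfl
  | cons x xs ih =>
    simp only [List.foldl_cons, h x (by simp)]
    exact ih b (fun y hy acc => h y (List.mem_cons_of_mem x hy) acc)

-- ===== VERDICT (by name: the statement is the Claim_ definition above) =====
theorem gluing_spec : Claim_equal_gluing := by
  intro SNF amount _ _
  unfold Spec_gluing gluing gluing_alt buildBuckets
  apply PySem.List.foldl_congr_mem
  intro nf i hi
  rw [List.mem_range] at hi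
  simp only []
  rw [bucket_foldl SNF (List.range SNF.length) PySem.Dict.empty]
  have hempty : PySem.Dict.getD (PySem.Dict.empty : PySem.Dict (List Int) (List Nat))
      (sigB (SNF.getD i [])) [] = [] := by
    simp [PySem.Dict.empty, PySem.Dict.getD, PySem.Dict.get?]
  rw [hempty, List.nil_append]
  have h1 : (i+1) + (SNF.length - (i+1)) = SNF.length := by omega
  have hsplit : List.range SNF.length =
      List.range' 0 (i+1) ++ List.range' (i+1) (SNF.length - (i+1)) := by
    rw [List.range_eq_range', ← h1, ← List.range'_append_1, Nat.zero_add]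
    congr 1
    congr 1
    omega
  rw [hsplit, List.filter_append, List.foldl_append]
  rw [foldl_of_fixed _ (List.filter _ (List.range' 0 (i+1))) nf (by
    intro j hj acc
    have hji : j ≤ i := by
      have := List.mem_of_mem_filter hj
      simp only [List.mem_range'_1] at this
      omega
    simp [Nat.not_lt.mpr hji])]
  rw [List.foldl_filter]
  apply PySem.List.foldl_congr_mem
  intro acc j hj
  have hij : i < j := by
    simp only [List.mem_range'_1] at hj
    omega
  rw [PySem.List.foldl_append_ite_eq_filter, List.nil_append]
  simp only [List.getD, hij, if_true]
  by_cases hs : sigA (SNF[i]?.getD []) = sigA (SNF[j]?.getD [])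
  · rw [if_pos hs]
    simp [show sigB (SNF[j]?.getD []) = sigB (SNF[i]?.getD []) from hs.symm]
  · rw [if_neg hs]
    simp [show ¬ sigB (SNF[j]?.getD []) = sigB (SNF[i]?.getD []) from fun hh => hs hh.symm]
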